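-- pv_equiv track=rewrite | github.com/transhapHigsn/animated-goggles | algo/main.py | create_final
-- ===== SOURCE A (Python) =====
-- vowels = {
--     'a': True,
--     'e': True,
--     'i': True,
--     'o': True,
--     'u': True
-- }
--
-- def calculate_sum(n):
--     return (n-1)*(n)/2
--
-- def create_final(s):
--     count, pattern_length, is_last_char_vowel, has_last_char = 0, 1, False, False
--     for i in s:
--         is_vowel = vowels.get(i, False)
--
--         if is_vowel == is_last_char_vowel:
--             if pattern_length > 1:
--                 count += calculate_sum(pattern_length)
--                 pattern_length = 1
--         elif has_last_char:
--             pattern_length += 1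
--
--         is_last_char_vowel = is_vowel
--
--         # this can be also solved by using string index instead of a flag.
--         if not has_last_char:
--             has_last_char = True
--
--     if pattern_length > 1:
--         count += calculate_sum(pattern_length)
--
--     return int(count)
-- ===== SOURCE B (Python) =====
-- def create_final(s):
--     count = 0
--     prev = None
--     cur = 0
--     for c in s:
--         cls = c in "aeiou"
--         if prev is not None and cls != prev:
--             cur += 1
--         else:
--             cur = 1
--         count += cur - 1
--         prev = cls
--     return count
-- ===== Notes on version B (the rewrite author's own statement) =====
-- stated objective: simpler
-- what changed: B replaces A's run-tracking with deferred triangular-number flushes (and an end-of-loop flush) by a single pass that adds (current alternating run length - 1) at each character, so no run bookkeeping or final flush is needed.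
import Mathlib
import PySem

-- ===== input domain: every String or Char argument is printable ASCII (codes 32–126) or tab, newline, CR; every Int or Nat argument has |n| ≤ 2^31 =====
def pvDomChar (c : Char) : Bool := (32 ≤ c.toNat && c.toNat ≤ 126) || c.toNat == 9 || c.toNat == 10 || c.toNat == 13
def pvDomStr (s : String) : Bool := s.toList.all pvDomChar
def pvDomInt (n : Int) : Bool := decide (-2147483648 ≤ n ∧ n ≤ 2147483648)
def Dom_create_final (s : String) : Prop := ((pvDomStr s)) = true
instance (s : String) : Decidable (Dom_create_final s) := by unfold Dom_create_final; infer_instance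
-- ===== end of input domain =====

-- B counts per position (run length - 1) in one pass instead of A's per-run triangular flushes: simpler, no end-of-loop flush.

-- ===== PORT A =====
def pvVowels : List Char := ['a', 'e', 'i', 'o', 'u']

-- A computes (n-1)*n/2 with float '/'; (n-1)*n is even, so it is exact: ported as integer floor division.
def calculate_sum (n : Int) : Int := PySem.Int.floordiv ((n - 1) * n) 2

def pvStepA (st : Int × Int × Bool × Bool) (i : Char) : Int × Int × Bool × Bool :=
  let (count, pattern_length, is_last_char_vowel, _has_last_char) := st
  let is_vowel := pvVowels.contains i
  let (count, pattern_length) :=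
    if is_vowel = is_last_char_vowel then
      if pattern_length > 1 then (count + calculate_sum pattern_length, 1) else (count, pattern_length)
    else if _has_last_char then (count, pattern_length + 1)
    else (count, pattern_length)
  (count, pattern_length, is_vowel, true)

def create_final (s : String) : Int :=
  let st := s.toList.foldl pvStepA ((0 : Int), (1 : Int), false, false)
  let (count, pattern_length, _, _) := st
  if pattern_length > 1 then count + calculate_sum pattern_length else count

-- ===== PORT B =====
def pvVowelsB : List Char := ['a', 'e', 'i', 'o', 'u']

def pvStepB (st : Int × Option Bool × Int) (c : Char) : Int × Option Bool × Int :=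
  let (count, prev, cur) := st
  let cls := pvVowelsB.contains c
  let cur :=
    match prev with
    | some p => if cls ≠ p then cur + 1 else 1
    | none => 1
  (count + (cur - 1), some cls, cur)

def create_final_alt (s : String) : Int :=
  (s.toList.foldl pvStepB ((0 : Int), none, (0 : Int))).1

-- ===== PRECONDITION & SPEC =====
def Spec_create_final (s : String) (out : Int) : Prop := out = create_final_alt s
instance (s : String) (out : Int) : Decidable (Spec_create_final s out) := by unfold Spec_create_final; infer_instance

-- ===== CLAIM (what is proved, stated in full; the proofs are below) =====
def Claim_equal_create_final : Prop := ∀ (s : String), Dom_create_final s → Spec_create_final s (create_final s)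

-- ===== LEMMAS AND PROOFS =====

theorem calculate_sum_spec (n : Int) : 2 * calculate_sum n = (n - 1) * n := by
  have h : Even ((n - 1) * n) := by
    have := Int.even_mul_succ_self (n - 1)
    simpa using this
  obtain ⟨k, hk⟩ := h
  have hk2 : (n - 1) * n = 2 * k := by omega
  unfold calculate_sum
  rw [hk2, PySem.Int.floordiv_eq_ediv_of_pos (by omega)]
  omega

theorem calculate_sum_one : calculate_sum 1 = 0 := by decide

theorem calculate_sum_succ (n : Int) : calculate_sum (n + 1) = calculate_sum n + n := by
  have h1 := calculate_sum_spec n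
  have h2 := calculate_sum_spec (n + 1)
  nlinarith [h1, h2]

def pvFinishA (st : Int × Int × Bool × Bool) : Int :=
  let (count, pattern_length, _, _) := st
  if pattern_length > 1 then count + calculate_sum pattern_length else count

theorem loop_equiv (l : List Char) :
    ∀ (count pl : Int) (last : Bool), 1 ≤ pl →
    pvFinishA (l.foldl pvStepA (count, pl, last, true)) =
      (l.foldl pvStepB (count + calculate_sum pl, some last, pl)).1 := by
  induction l with
  | nil =>
      intro count pl last hpl
      simp only [List.foldl_nil, pvFinishA]
      by_cases h : pl > 1
      · simp [h]
      · have : pl = 1 := by omega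
        simp [this, calculate_sum_one]
  | cons c l ih =>
      intro count pl last hpl
      simp only [List.foldl_cons]
      obtain ⟨v, hvc⟩ : ∃ v, pvVowels.contains c = v := ⟨_, rfl⟩
      have hvcB : pvVowelsB.contains c = v := hvc
      by_cases hv : v = last
      · -- same class: A flushes the run, B resets cur to 1
        have hA : pvStepA (count, pl, last, true) c =
            (count + calculate_sum pl, 1, v, true) := by
          simp only [pvStepA, hvc]
          by_cases h1 : pl > 1
          · simp [hv, h1]
          · have hpl1 : pl = 1 := by omega
            simp [hv, hpl1, calculate_sum_one]
        have hB : pvStepB (count + calculate_sum pl, some last, pl) c =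
            (count + calculate_sum pl, some v, 1) := by
          simp only [pvStepB, hvcB, hv]
          simp
        rw [hA, hB]
        have := ih (count + calculate_sum pl) 1 v (by omega)
        simpa [calculate_sum_one] using this
      · -- class differs: both extend the run
        have hA : pvStepA (count, pl, last, true) c =
            (count, pl + 1, v, true) := by
          simp only [pvStepA, hvc]
          simp [hv]
        have hB : pvStepB (count + calculate_sum pl, some last, pl) c =
            (count + calculate_sum (pl + 1), some v, pl + 1) := by
          simp only [pvStepB, hvcB]
          simp [hv, calculate_sum_succ pl]
          ring
        rw [hA, hB]
        exact ih count (pl + 1) v (by omega)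

-- ===== VERDICT (by name: the statement is the Claim_ definition above) =====
theorem create_final_spec : Claim_equal_create_final := by
  unfold Claim_equal_create_final
  intro s _
  unfold Spec_create_final create_final create_final_alt
  cases hl : s.toList with
  | nil => simp
  | cons c l =>
      -- first character: both reach the same aligned state regardless of its class
      obtain ⟨v, hvc⟩ : ∃ v, pvVowels.contains c = v := ⟨_, rfl⟩
      have hvcB : pvVowelsB.contains c = v := hvc
      have hA1 : pvStepA ((0 : Int), (1 : Int), false, false) c =
          (0, 1, v, true) := by
        simp only [pvStepA, hvc]
        by_cases hv : v = false <;> simp [hv]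
      have hB1 : pvStepB ((0 : Int), none, (0 : Int)) c =
          (0, some v, 1) := by
        simp only [pvStepB, hvcB]
        simp
      simp only [List.foldl_cons, hA1, hB1]
      have := loop_equiv l 0 1 v (by omega)
      simpa [pvFinishA, calculate_sum_one] using this
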